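-- pv_equiv track=rewrite | github.com/LIAAD/Time-Matters | Time_Matters_SingleDoc/InvertedIndex.py | find_more_relevant
-- ===== SOURCE A (Python) =====
-- def test_trans(text):
--     return text.translate(str.maketrans('', '', '!,:.;?()\n'))
--
-- def find_more_relevant(y, text_tokens, n_gram, relevant_words_array, final_list, mirror_final_list):
--
--     temporal_list = []
--     temporal_list_two = []
--
--     tmp = []
--     for i in range(n_gram):
--
--         temporal_list.append(text_tokens[y:y + i + 1])
--         k = test_trans(' '.join(temporal_list[i])).lower()
--         if k.lower() in relevant_words_array:
--             temporal_list_two.append(k)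
--
--     x_list = sorted(temporal_list_two, key=lambda x: relevant_words_array.index(x))
--     try:
--         final_list.append(x_list[0])
--         tmp.append(x_list[0])
--         mirror_final_list.append(tmp[0].split())
--     except:
--         pass
--
--     return final_list, mirror_final_list
-- ===== SOURCE B (Python) =====
-- def test_trans(text):
--     return text.translate(str.maketrans('', '', '!,:.;?()\n'))
--
-- def find_more_relevant(y, text_tokens, n_gram, relevant_words_array, final_list, mirror_final_list):
--     # Collect every candidate n-gram string once, then scan the priority-ordered
--     # array and take its first element that is a candidate: no sort needed.
--     candidates = set()
--     for i in range(n_gram):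
--         candidates.add(test_trans(' '.join(text_tokens[y:y + i + 1])).lower())
--     for w in relevant_words_array:
--         if w in candidates:
--             final_list.append(w)
--             mirror_final_list.append(w.split())
--             break
--     return final_list, mirror_final_list
-- ===== Notes on version B (the rewrite author's own statement) =====
-- stated objective: alternative
-- what changed: Instead of collecting matching n-grams, sorting them with a relevant_words_array.index key (a linear array scan per comparison) and taking the head, B collects all candidate n-gram strings into a set once and scans relevant_words_array in its given priority order, taking the first element that is a candidate; the sort and the repeated .index scans disappear (both still pay the O(g^2*L) n-gram-building cost).
import Mathlib
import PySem

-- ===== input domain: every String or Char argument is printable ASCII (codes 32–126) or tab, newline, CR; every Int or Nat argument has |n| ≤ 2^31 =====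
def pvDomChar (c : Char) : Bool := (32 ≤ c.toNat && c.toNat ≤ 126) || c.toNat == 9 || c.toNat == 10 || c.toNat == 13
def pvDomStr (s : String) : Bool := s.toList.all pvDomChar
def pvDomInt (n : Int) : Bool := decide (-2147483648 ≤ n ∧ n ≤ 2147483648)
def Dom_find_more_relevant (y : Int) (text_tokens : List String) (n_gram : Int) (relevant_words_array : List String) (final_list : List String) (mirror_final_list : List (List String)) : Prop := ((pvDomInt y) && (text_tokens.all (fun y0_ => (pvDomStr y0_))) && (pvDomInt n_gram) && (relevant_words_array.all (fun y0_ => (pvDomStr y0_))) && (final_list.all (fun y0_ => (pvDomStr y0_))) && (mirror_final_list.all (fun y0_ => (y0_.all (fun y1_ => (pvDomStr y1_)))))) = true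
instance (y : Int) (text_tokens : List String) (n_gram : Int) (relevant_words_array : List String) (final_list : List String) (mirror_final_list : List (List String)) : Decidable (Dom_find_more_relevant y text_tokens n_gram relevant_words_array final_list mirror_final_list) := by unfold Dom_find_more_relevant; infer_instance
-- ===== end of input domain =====

-- B replaces A's "collect matching n-grams, sort them by relevant_words_array.index, take the head"
-- with "collect all candidate n-grams in a set, scan relevant_words_array in its priority order,
-- take the first hit" (objective: alternative).  Both Pythons mutate final_list/mirror_final_list
-- in place identically; the theorems below are about the returned pair.

-- ===== PORT A =====
-- shared helper of both Python files: text.translate(str.maketrans('', '', '!,:.;?()\n'))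
def pvRemoveChars : List Char := "!,:.;?()\n".toList
def test_trans (s : String) : String := String.ofList (s.toList.filter (fun c => !pvRemoveChars.contains c))

def find_more_relevant (y : Int) (text_tokens : List String) (n_gram : Int) (relevant_words_array : List String) (final_list : List String) (mirror_final_list : List (List String)) : List String × List (List String) :=
  let st := (PySem.List.pyRange 0 n_gram 1).foldl
    (fun (st : List (List String) × List String) i =>
      let temporal_list := st.1 ++ [PySem.List.slice text_tokens (some y) (some (y + i + 1))]
      let k := PySem.Str.lower (test_trans (PySem.Str.join " " ((PySem.List.pyGet? temporal_list i).getD [])))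
      if PySem.Str.lower k ∈ relevant_words_array then (temporal_list, st.2 ++ [k]) else (temporal_list, st.2))
    ([], [])
  let x_list := PySem.List.sorted st.2 (fun x => (PySem.List.index? relevant_words_array x).getD 0)
  match x_list with
  | [] => (final_list, mirror_final_list)                 -- x_list[0] raises IndexError; except: pass
  | x :: _ => (final_list ++ [x], mirror_final_list ++ [PySem.Str.split₀ x])

-- ===== PORT B =====
def find_more_relevant_alt (y : Int) (text_tokens : List String) (n_gram : Int) (relevant_words_array : List String) (final_list : List String) (mirror_final_list : List (List String)) : List String × List (List String) :=
  let candidates : PySem.Set String := (PySem.List.pyRange 0 n_gram 1).foldl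
    (fun (s : PySem.Set String) i =>
      PySem.Set.add s (PySem.Str.lower (test_trans (PySem.Str.join " " (PySem.List.slice text_tokens (some y) (some (y + i + 1)))))))
    PySem.Set.empty
  match relevant_words_array.find? (fun w => PySem.Set.contains candidates w) with
  | none => (final_list, mirror_final_list)
  | some w => (final_list ++ [w], mirror_final_list ++ [PySem.Str.split₀ w])

-- ===== PRECONDITION & SPEC =====
def Spec_find_more_relevant (y : Int) (text_tokens : List String) (n_gram : Int) (relevant_words_array : List String) (final_list : List String) (mirror_final_list : List (List String)) (out : List String × List (List String)) : Prop := out = find_more_relevant_alt y text_tokens n_gram relevant_words_array final_list mirror_final_list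
instance (y : Int) (text_tokens : List String) (n_gram : Int) (relevant_words_array : List String) (final_list : List String) (mirror_final_list : List (List String)) (out : List String × List (List String)) : Decidable (Spec_find_more_relevant y text_tokens n_gram relevant_words_array final_list mirror_final_list out) := by unfold Spec_find_more_relevant; infer_instance

-- ===== CLAIM (what is proved, stated in full; the proofs are below) =====
def Claim_equal_find_more_relevant : Prop := ∀ (y : Int) (text_tokens : List String) (n_gram : Int) (relevant_words_array : List String) (final_list : List String) (mirror_final_list : List (List String)), Dom_find_more_relevant y text_tokens n_gram relevant_words_array final_list mirror_final_list → Spec_find_more_relevant y text_tokens n_gram relevant_words_array final_list mirror_final_list (find_more_relevant y text_tokens n_gram relevant_words_array final_list mirror_final_list)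

-- ===== LEMMAS AND PROOFS =====

-- k_i: the candidate string built at loop index i (both programs compute it)
def pvKf (y : Int) (text_tokens : List String) (i : Int) : String :=
  PySem.Str.lower (test_trans (PySem.Str.join " " (PySem.List.slice text_tokens (some y) (some (y + i + 1)))))

theorem lowerChar_idem (c : Char) : PySem.Chars.lowerChar (PySem.Chars.lowerChar c) = PySem.Chars.lowerChar c := by
  unfold PySem.Chars.lowerChar PySem.Chars.isupper
  split_ifs with h1 h2
  · exfalso
    simp only [Bool.and_eq_true, decide_eq_true_eq, Char.le_def, UInt32.le_iff_toNat_le] at h1 h2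
    have hA : 'A'.val.toNat = 65 := rfl
    have hZ : 'Z'.val.toNat = 90 := rfl
    have hc : c.val.toNat = c.toNat := rfl
    have hv : (Char.ofNat (c.toNat + 32)).val.toNat = c.toNat + 32 := by
      show (Char.ofNat (c.toNat + 32)).toNat = _
      rw [Char.toNat_ofNat, if_pos (Or.inl (by omega))]
    omega
  · rfl
  · rfl

theorem chars_lower_idem (s : List Char) : PySem.Chars.lower (PySem.Chars.lower s) = PySem.Chars.lower s := by
  unfold PySem.Chars.lower
  rw [List.map_map]
  apply List.map_congr_left
  intro c _
  exact lowerChar_idem c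

theorem lower_idem (s : String) : PySem.Str.lower (PySem.Str.lower s) = PySem.Str.lower s := by
  have h : (PySem.Str.lower (PySem.Str.lower s)).toList = (PySem.Str.lower s).toList := by
    simp [PySem.Str.toList_lower, chars_lower_idem]
  exact String.toList_inj.mp h

theorem kf_lower (y : Int) (tt : List String) (i : Int) :
    PySem.Str.lower (pvKf y tt i) = pvKf y tt i := by
  unfold pvKf; exact lower_idem _

-- sorted of the empty list is empty
theorem sorted_nil_eq (rwa : List String) :
    PySem.List.sorted ([] : List String) (fun x => (PySem.List.index? rwa x).getD 0) false = [] :=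
  List.perm_nil.mp (PySem.List.sorted_perm ([] : List String) (fun x => (PySem.List.index? rwa x).getD 0) false)

-- A's loop computes (list of slices, filtered candidate list) in closed form
theorem afold_eq (y : Int) (tt : List String) (rwa : List String) (n : Nat) :
    (PySem.List.pyRange 0 (n : Int) 1).foldl
      (fun (st : List (List String) × List String) i =>
        let temporal_list := st.1 ++ [PySem.List.slice tt (some y) (some (y + i + 1))]
        let k := PySem.Str.lower (test_trans (PySem.Str.join " " ((PySem.List.pyGet? temporal_list i).getD [])))
        if PySem.Str.lower k ∈ rwa then (temporal_list, st.2 ++ [k]) else (temporal_list, st.2))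
      ([], [])
    = ((PySem.List.pyRange 0 (n : Int) 1).map (fun i => PySem.List.slice tt (some y) (some (y + i + 1))),
       ((PySem.List.pyRange 0 (n : Int) 1).map (pvKf y tt)).filter
         (fun k => decide (PySem.Str.lower k ∈ rwa))) := by
  induction n with
  | zero => simp [PySem.List.pyRange_one_eq_nil]
  | succ n ih =>
    have hcast : ((n + 1 : Nat) : Int) = (n : Int) + 1 := by push_cast; ring
    rw [hcast, PySem.List.pyRange_one_succ_right (Int.natCast_nonneg n)]
    rw [List.foldl_append, List.map_append, List.map_append, List.filter_append, ih]
    simp only [List.foldl_cons, List.foldl_nil, List.map_cons, List.map_nil, List.filter_cons, List.filter_nil]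
    have hlen : ((PySem.List.pyRange 0 (n : Int) 1).map (fun i => PySem.List.slice tt (some y) (some (y + i + 1)))).length = n := by
      rw [List.length_map, PySem.List.length_pyRange_one]; omega
    have hget : (PySem.List.pyGet? (((PySem.List.pyRange 0 (n : Int) 1).map (fun i => PySem.List.slice tt (some y) (some (y + i + 1)))) ++ [PySem.List.slice tt (some y) (some (y + (n : Int) + 1))]) (n : Int)) = some (PySem.List.slice tt (some y) (some (y + (n : Int) + 1))) := by
      rw [PySem.List.pyGet?_natCast]
      have h2 := List.getElem?_concat_length (l := (PySem.List.pyRange 0 (n : Int) 1).map (fun i => PySem.List.slice tt (some y) (some (y + i + 1)))) (a := PySem.List.slice tt (some y) (some (y + (n : Int) + 1)))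
      rwa [hlen] at h2
    rw [hget]
    show (if PySem.Str.lower (pvKf y tt n) ∈ rwa then _ else _) = _
    split_ifs with h <;> simp_all [pvKf]

-- head of A's sorted match list = B's first scan hit
theorem head_sorted_eq_find (rwa ks : List String) :
    (PySem.List.sorted (ks.filter (fun k => decide (k ∈ rwa)))
        (fun x => (PySem.List.index? rwa x).getD 0)).head?
      = rwa.find? (fun w => decide (w ∈ ks)) := by
  cases hf : rwa.find? (fun w => decide (w ∈ ks)) with
  | none =>
    have hnone := List.find?_eq_none.mp hf
    have htl2 : ks.filter (fun k => decide (k ∈ rwa)) = [] := by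
      rw [List.eq_nil_iff_forall_not_mem]
      intro x hx
      obtain ⟨hxks, hxrwa⟩ := List.mem_filter.mp hx
      exact (by simpa using hnone x (by simpa using hxrwa) : x ∉ ks) hxks
    rw [htl2, sorted_nil_eq]
    rfl
  | some w =>
    obtain ⟨hpw, as, bs, hsplit, hprev⟩ := List.find?_eq_some_iff_append.mp hf
    have hwks : w ∈ ks := by simpa using hpw
    have hwrwa : w ∈ rwa := by rw [hsplit]; exact List.mem_append_right _ (List.mem_cons_self)
    have hwtl2 : w ∈ ks.filter (fun k => decide (k ∈ rwa)) := List.mem_filter.mpr ⟨hwks, by simpa⟩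
    cases hs : PySem.List.sorted (ks.filter (fun k => decide (k ∈ rwa))) (fun x => (PySem.List.index? rwa x).getD 0) with
    | nil =>
      exfalso
      have hperm := PySem.List.sorted_perm (ks.filter (fun k => decide (k ∈ rwa))) (fun x => (PySem.List.index? rwa x).getD 0) false
      rw [hs] at hperm
      exact absurd (hperm.symm.mem_iff.mp hwtl2) (List.not_mem_nil)
    | cons m t =>
      have hperm := PySem.List.sorted_perm (ks.filter (fun k => decide (k ∈ rwa))) (fun x => (PySem.List.index? rwa x).getD 0) false
      rw [hs] at hperm
      have hmtl2 : m ∈ ks.filter (fun k => decide (k ∈ rwa)) := hperm.mem_iff.mp (List.mem_cons_self)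
      obtain ⟨hmks', hmrwa'⟩ := List.mem_filter.mp hmtl2
      have hmks : m ∈ ks := hmks'
      have hmrwa : m ∈ rwa := by simpa using hmrwa'
      have hkey := PySem.List.key_head_sorted_le (ks.filter (fun k => decide (k ∈ rwa))) (fun x => (PySem.List.index? rwa x).getD 0) hs w hwtl2
      obtain ⟨jm, hjm⟩ := Option.isSome_iff_exists.mp ((PySem.List.index?_isSome_iff rwa m).mpr hmrwa)
      obtain ⟨jw, hjw⟩ := Option.isSome_iff_exists.mp ((PySem.List.index?_isSome_iff rwa w).mpr hwrwa)
      obtain ⟨hjmlt, hjmget, hjmmin⟩ := PySem.List.getElem_of_index?_eq_some hjm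
      obtain ⟨hjwlt, hjwget, hjwmin⟩ := PySem.List.getElem_of_index?_eq_some hjw
      simp only [hjm, hjw, Option.getD_some] at hkey
      have haslen : as.length < rwa.length := by
        rw [hsplit]; simp
      have hgetas : rwa[as.length]'haslen = w := by
        have h0 : rwa[as.length]'haslen = (as ++ w :: bs)[as.length]'(by rw [← hsplit]; exact haslen) := by
          simp only [hsplit]
        rw [h0, List.getElem_append_right (Nat.le_refl _)]
        simp
      have hjw_le : jw ≤ as.length := by
        by_contra hlt
        exact hjwmin as.length (by omega) hgetas
      have hjm_ge : as.length ≤ jm := by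
        by_contra hlt
        push Not at hlt
        have hmem : rwa[jm]'hjmlt ∈ as := by
          have h1 : rwa[jm]'hjmlt = as[jm]'hlt := by
            have h0 : rwa[jm]'hjmlt = (as ++ w :: bs)[jm]'(by rw [← hsplit]; exact hjmlt) := by
              simp only [hsplit]
            rw [h0, List.getElem_append_left hlt]
          rw [h1]; exact List.getElem_mem hlt
        have hba := hprev _ hmem
        rw [hjmget] at hba
        simp at hba
        exact hba hmks
      have hmw : m = w := by
        have hje : jm = as.length := by omega
        rw [← hjmget, ← hgetas]
        congr 1
      rw [hmw]
      rfl

-- B's candidate set has exactly the candidate strings as members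
theorem mem_bfold (y : Int) (tt : List String) (n_gram : Int) (w : String) :
    (w ∈ (PySem.List.pyRange 0 n_gram 1).foldl
      (fun (s : PySem.Set String) i =>
        PySem.Set.add s (PySem.Str.lower (test_trans (PySem.Str.join " " (PySem.List.slice tt (some y) (some (y + i + 1)))))))
      PySem.Set.empty)
    ↔ w ∈ (PySem.List.pyRange 0 n_gram 1).map (pvKf y tt) := by
  rw [PySem.Set.mem_foldl_add]
  simp [pvKf, PySem.Set.empty, eq_comm]

-- ===== VERDICT (by name: the statement is the Claim_ definition above) =====
theorem find_more_relevant_spec : Claim_equal_find_more_relevant := by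
  intro y tt n_gram rwa fl mfl _hdom
  unfold Spec_find_more_relevant find_more_relevant find_more_relevant_alt
  simp only []
  have hfind : rwa.find? (fun w => PySem.Set.contains
      ((PySem.List.pyRange 0 n_gram 1).foldl
        (fun (s : PySem.Set String) i =>
          PySem.Set.add s (PySem.Str.lower (test_trans (PySem.Str.join " " (PySem.List.slice tt (some y) (some (y + i + 1)))))))
        PySem.Set.empty) w)
      = rwa.find? (fun w => decide (w ∈ (PySem.List.pyRange 0 n_gram 1).map (pvKf y tt))) := by
    have hpe : (fun w => PySem.Set.contains
        ((PySem.List.pyRange 0 n_gram 1).foldl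
          (fun (s : PySem.Set String) i =>
            PySem.Set.add s (PySem.Str.lower (test_trans (PySem.Str.join " " (PySem.List.slice tt (some y) (some (y + i + 1)))))))
          PySem.Set.empty) w)
        = (fun w => decide (w ∈ (PySem.List.pyRange 0 n_gram 1).map (pvKf y tt))) := by
      funext w
      rw [Bool.eq_iff_iff]
      simp only [decide_eq_true_eq]
      rw [PySem.Set.contains_iff]
      exact mem_bfold y tt n_gram w
    rw [hpe]
  rcases (by omega : n_gram ≤ 0 ∨ 0 < n_gram) with hle | hpos
  · rw [PySem.List.pyRange_one_eq_nil hle]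
    simp only [List.foldl_nil]
    rw [sorted_nil_eq rwa]
    have : rwa.find? (fun w => PySem.Set.contains (PySem.Set.empty : PySem.Set String) w) = none := by
      apply List.find?_eq_none.mpr
      intro w _
      simp [PySem.Set.empty]
    rw [this]
  · obtain ⟨n, hn⟩ : ∃ n : Nat, n_gram = (n : Int) := ⟨n_gram.toNat, by omega⟩
    subst hn
    rw [afold_eq y tt rwa n, hfind]
    have hfilter : ((PySem.List.pyRange 0 (n : Int) 1).map (pvKf y tt)).filter
        (fun k => decide (PySem.Str.lower k ∈ rwa))
      = ((PySem.List.pyRange 0 (n : Int) 1).map (pvKf y tt)).filter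
        (fun k => decide (k ∈ rwa)) := by
      apply List.filter_congr
      intro k hk
      obtain ⟨i, _, hik⟩ := List.mem_map.mp hk
      rw [← hik, kf_lower]
    rw [hfilter]
    have hhead := head_sorted_eq_find rwa ((PySem.List.pyRange 0 (n : Int) 1).map (pvKf y tt))
    cases hs : PySem.List.sorted (((PySem.List.pyRange 0 (n : Int) 1).map (pvKf y tt)).filter (fun k => decide (k ∈ rwa)))
        (fun x => (PySem.List.index? rwa x).getD 0) with
    | nil =>
      rw [hs] at hhead
      rw [← hhead]
      rfl
    | cons m t =>
      rw [hs] at hhead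
      rw [← hhead]
      rfl
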